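-- pv_equiv track=rewrite | github.com/fmwviormv/CyberpunkPythonHacks | cp2077chunk.py | unpack_int
-- ===== SOURCE A (Python) =====
-- def unpack_int(value):
--     value = iter(value)
--     byte = next(value)
--     res = byte & 63
--     reslen = 6
--     is_neg = byte >> 7
--     for byte in value:
--         res |= (byte & 127) << reslen
--         reslen += 7
--     return -res if is_neg else res
-- ===== SOURCE B (Python) =====
-- def unpack_int(value):
--     # Horner-style decode: read the first byte, then fold the remaining
--     # bytes from the high end down (reversed) with shift-accumulate.
--     it = iter(value)
--     b0 = next(it)
--     is_neg = b0 >> 7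
--     res = 0
--     for byte in reversed(list(it)):
--         res = (res << 7) | (byte & 127)
--     res = (res << 6) | (b0 & 63)
--     return -res if is_neg else res
-- ===== Notes on version B (the rewrite author's own statement) =====
-- stated objective: alternative
-- what changed: Replaces A's forward pass that ORs each byte at an increasing shift (carrying a running shift counter) with a reversed Horner fold: the tail bytes are folded high-to-low via res = (res << 7) | (byte & 127), then combined with the first byte's low 6 bits.
import Mathlib
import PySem

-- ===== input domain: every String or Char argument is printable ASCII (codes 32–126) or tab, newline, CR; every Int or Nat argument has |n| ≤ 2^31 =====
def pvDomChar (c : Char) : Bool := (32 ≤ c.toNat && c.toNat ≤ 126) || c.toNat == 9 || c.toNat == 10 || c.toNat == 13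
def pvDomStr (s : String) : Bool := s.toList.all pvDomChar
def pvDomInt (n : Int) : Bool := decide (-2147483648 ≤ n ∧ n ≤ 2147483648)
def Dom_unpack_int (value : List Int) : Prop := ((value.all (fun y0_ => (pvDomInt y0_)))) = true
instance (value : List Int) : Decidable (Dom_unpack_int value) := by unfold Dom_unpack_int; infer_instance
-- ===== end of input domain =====

-- B replaces A's increasing-shift OR pass with a reversed Horner fold over the
-- tail bytes; same cost, different accumulation strategy (objective: alternative).

-- ===== PORT A =====
-- A: res starts as first byte & 63, then each further byte ORs in 7 bits at an
-- increasing shift (reslen: 6, 13, 20, …); negate if bit 7 of the first byte.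
def unpack_int (value : List Int) : Int :=
  match value with
  | [] => 0   -- unreachable under Pre_: Python raises StopIteration here
  | byte :: rest =>
    let p := rest.foldl
      (fun (st : Int × Nat) b =>
        (PySem.Int.bor st.1 ((PySem.Int.band b 127) <<< st.2), st.2 + 7))
      (PySem.Int.band byte 63, 6)
    if byte >>> 7 ≠ 0 then -p.1 else p.1

-- ===== PORT B =====
-- B: fold the tail bytes reversed, Horner-style, then attach the first byte's
-- low 6 bits; negate if bit 7 of the first byte.
def unpack_int_alt (value : List Int) : Int :=
  match value with
  | [] => 0   -- unreachable under Pre_: Python raises StopIteration here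
  | b0 :: rest =>
    let h := rest.reverse.foldl
      (fun r b => PySem.Int.bor (r <<< (7:Nat)) (PySem.Int.band b 127)) 0
    let res := PySem.Int.bor (h <<< (6:Nat)) (PySem.Int.band b0 63)
    if b0 >>> 7 ≠ 0 then -res else res

-- ===== PRECONDITION & SPEC =====
-- Pre_ excludes only the empty list, on which Python A raises StopIteration.
def Pre_unpack_int (value : List Int) : Prop := value ≠ []
instance (value : List Int) : Decidable (Pre_unpack_int value) := by unfold Pre_unpack_int; infer_instance
def pvWitness_unpack_int : List Int := ([69, 130, 3])

def Spec_unpack_int (value : List Int) (out : Int) : Prop := out = unpack_int_alt value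
instance (value : List Int) (out : Int) : Decidable (Spec_unpack_int value out) := by unfold Spec_unpack_int; infer_instance

-- ===== CLAIM (what is proved, stated in full; the proofs are below) =====
def Claim_equal_unpack_int : Prop := ∀ (value : List Int), Dom_unpack_int value → Pre_unpack_int value → Spec_unpack_int value (unpack_int value)

-- ===== LEMMAS AND PROOFS =====

theorem band_mask127 (b : Int) : PySem.Int.band b 127 = b % 128 := by
  unfold PySem.Int.band
  split_ifs with h1 h2
  · rw [show ((127:Int).toNat = 127) from rfl,
      show (127:Nat) = 2^7 - 1 from rfl, Nat.and_two_pow_sub_one_eq_mod]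
    omega
  · norm_num at h2
  · rw [show ((127:Int).toNat = 127) from rfl, Nat.and_comm,
      show (127:Nat) = 2^7 - 1 from rfl, Nat.and_two_pow_sub_one_eq_mod]
    omega
  · norm_num at *

theorem band_mask63 (b : Int) : PySem.Int.band b 63 = b % 64 := by
  unfold PySem.Int.band
  split_ifs with h1 h2
  · rw [show ((63:Int).toNat = 63) from rfl,
      show (63:Nat) = 2^6 - 1 from rfl, Nat.and_two_pow_sub_one_eq_mod]
    omega
  · norm_num at h2
  · rw [show ((63:Int).toNat = 63) from rfl, Nat.and_comm,
      show (63:Nat) = 2^6 - 1 from rfl, Nat.and_two_pow_sub_one_eq_mod]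
    omega
  · norm_num at *

theorem shiftLeft_toNat (y : Int) (s : Nat) (hy : 0 ≤ y) : (y <<< s).toNat = y.toNat <<< s := by
  obtain ⟨n, rfl⟩ := Int.eq_ofNat_of_zero_le hy
  rw [Int.shiftLeft_eq, Nat.shiftLeft_eq,
    show ((2:Int)^s) = ((2^s:Nat):Int) by push_cast; ring,
    ← Nat.cast_mul, Int.toNat_natCast, Int.toNat_natCast]

theorem or_shift_add (y x : Int) (s : Nat) (hy : 0 ≤ y) (hx : 0 ≤ x) (h : x < 2^s) :
    PySem.Int.bor (y <<< s) x = y * 2^s + x := by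
  have hys : 0 ≤ y <<< s := by rw [Int.shiftLeft_eq]; positivity
  rw [PySem.Int.bor_of_nonneg hys hx, shiftLeft_toNat y s hy]
  have hxn : x.toNat < 2^s := by
    have : ((2:Int)^s) = ((2^s : Nat) : Int) := by push_cast; ring
    omega
  rw [← Nat.shiftLeft_add_eq_or_of_lt hxn y.toNat, Nat.shiftLeft_eq]
  push_cast [Int.toNat_of_nonneg hy, Int.toNat_of_nonneg hx]
  ring

-- payload of the tail bytes: Σ (bᵢ % 128) · 128^i, written as a foldr
def tailVal (rest : List Int) : Int :=
  rest.foldr (fun b r => b % 128 + 128 * r) 0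

theorem tailVal_nonneg (rest : List Int) : 0 ≤ tailVal rest := by
  induction rest with
  | nil => simp [tailVal]
  | cons b t ih =>
    simp only [tailVal, List.foldr_cons] at *
    have : 0 ≤ b % 128 := Int.emod_nonneg b (by norm_num)
    omega

theorem A_loop_inv (rest : List Int) : ∀ (x : Int) (s : Nat), 0 ≤ x → x < 2^s →
    (rest.foldl (fun (st : Int × Nat) b =>
        (PySem.Int.bor st.1 ((PySem.Int.band b 127) <<< st.2), st.2 + 7)) (x, s)).1
      = x + 2^s * tailVal rest := by
  induction rest with
  | nil => intro x s _ _; simp [tailVal]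
  | cons b t ih =>
    intro x s hx0 hxs
    have hm0 : 0 ≤ b % 128 := Int.emod_nonneg b (by norm_num)
    have hm1 : b % 128 < 128 := Int.emod_lt_of_pos b (by norm_num)
    have hpow : (0:Int) < 2^s := by positivity
    have hstep : PySem.Int.bor x ((PySem.Int.band b 127) <<< s) = x + (b % 128) * 2^s := by
      rw [band_mask127, PySem.Int.bor_comm,
        or_shift_add (b % 128) x s hm0 hx0 hxs]
      ring
    simp only [List.foldl_cons]
    rw [hstep]
    have hbig : x + (b % 128) * 2^s < 2^(s+7) := by
      have : (2:Int)^(s+7) = 2^s * 128 := by rw [pow_add]; norm_num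
      nlinarith
    rw [ih (x + (b % 128) * 2^s) (s+7) (by nlinarith) hbig]
    simp only [tailVal, List.foldr_cons]
    rw [pow_add]
    ring

theorem B_fold_eq (rest : List Int) :
    rest.reverse.foldl (fun r b => PySem.Int.bor (r <<< (7:Nat)) (PySem.Int.band b 127)) 0
      = tailVal rest := by
  induction rest with
  | nil => simp [tailVal]
  | cons b t ih =>
    have hm0 : 0 ≤ b % 128 := Int.emod_nonneg b (by norm_num)
    have hm1 : b % 128 < 128 := Int.emod_lt_of_pos b (by norm_num)
    rw [List.reverse_cons, List.foldl_append, List.foldl_cons, List.foldl_nil, ih,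
      band_mask127,
      or_shift_add (tailVal t) (b % 128) 7 (tailVal_nonneg t) hm0 (by omega)]
    simp only [tailVal, List.foldr_cons]
    ring

-- ===== VERDICT (by name: the statement is the Claim_ definition above) =====
theorem unpack_int_spec : Claim_equal_unpack_int := by
  intro value _ hpre
  unfold Spec_unpack_int
  match value with
  | [] => exact absurd rfl hpre
  | b0 :: rest =>
    have h0 : 0 ≤ b0 % 64 := Int.emod_nonneg b0 (by norm_num)
    have h1 : b0 % 64 < 64 := Int.emod_lt_of_pos b0 (by norm_num)
    have hA := A_loop_inv rest (b0 % 64) 6 h0 (by norm_num at h1 ⊢; omega)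
    have hB : PySem.Int.bor ((rest.reverse.foldl
        (fun r b => PySem.Int.bor (r <<< (7:Nat)) (PySem.Int.band b 127)) 0) <<< (6:Nat))
        (b0 % 64)
        = b0 % 64 + 2^6 * tailVal rest := by
      rw [B_fold_eq,
        or_shift_add (tailVal rest) (b0 % 64) 6 (tailVal_nonneg rest) h0 (by norm_num; omega)]
      ring
    simp only [unpack_int, unpack_int_alt, band_mask63]
    rw [hA, hB]
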